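-- pv_equiv track=rewrite | github.com/mSpuchliak/LineTracer-DDPG | line_tracer.py | calc_correct_rows
-- ===== SOURCE A (Python) =====
-- def calc_correct_rows(sensor_state):
--     rows_evaluation = []
--
--     for rows in sensor_state:
--         row_evaluation = 0
--
--         for pixel in rows:
--             row_evaluation += pixel[0]
--         rows_evaluation.append(row_evaluation)
--
--     correct_rows_count = 0
--
--     for row in rows_evaluation:
--         if(row > 15):
--             correct_rows_count += 1
--
--     return correct_rows_count
-- ===== SOURCE B (Python) =====
-- def calc_correct_rows(sensor_state):
--     def row_sum(row):
--         if not row: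
--             return 0
--         return row[0][0] + row_sum(row[1:])
--
--     if not sensor_state:
--         return 0
--     return (1 if row_sum(sensor_state[0]) > 15 else 0) + calc_correct_rows(sensor_state[1:])
-- ===== Notes on version B (the rewrite author's own statement) =====
-- stated objective: alternative
-- what changed: Replaces A's two imperative passes (build a list of row sums, then scan it counting) with a purely recursive decomposition: a recursive row_sum over each row and structural recursion over the rows that adds the per-row indicator back-to-front, with no loops and no intermediate list.
import Mathlib
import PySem

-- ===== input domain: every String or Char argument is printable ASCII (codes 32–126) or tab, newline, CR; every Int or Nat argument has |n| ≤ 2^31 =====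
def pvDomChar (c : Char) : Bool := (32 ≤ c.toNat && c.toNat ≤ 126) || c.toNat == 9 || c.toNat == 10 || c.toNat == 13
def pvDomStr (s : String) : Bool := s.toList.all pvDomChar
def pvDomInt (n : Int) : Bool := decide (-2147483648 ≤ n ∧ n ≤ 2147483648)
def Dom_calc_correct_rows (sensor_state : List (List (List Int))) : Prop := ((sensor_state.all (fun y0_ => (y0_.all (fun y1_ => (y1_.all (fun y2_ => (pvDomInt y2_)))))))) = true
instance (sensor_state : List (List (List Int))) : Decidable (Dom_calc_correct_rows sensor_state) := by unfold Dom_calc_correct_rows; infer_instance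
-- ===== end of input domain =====

-- B replaces A's two imperative passes (intermediate list of row sums, then a counting scan) with a purely recursive decomposition (objective: alternative).
-- Pre_ excludes inputs containing an empty pixel, on which Python's pixel[0] raises IndexError.


-- ===== PORT A =====
-- pixel[0] is ported with pyGet?; .getD 0 is only reached outside Pre_ (empty pixel ⇒ Python IndexError)
def calc_correct_rows (sensor_state : List (List (List Int))) : Int :=
  let rows_evaluation :=
    sensor_state.foldl
      (fun acc rows =>
        acc ++ [rows.foldl (fun row_evaluation pixel =>
          row_evaluation + (PySem.List.pyGet? pixel 0).getD 0) 0]) []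
  rows_evaluation.foldl (fun correct_rows_count row =>
    if row > 15 then correct_rows_count + 1 else correct_rows_count) 0

-- ===== PORT B =====
-- row_sum: recursion on the pixel list (row[0][0] + row_sum(row[1:]))
def pvRowSum (row : List (List Int)) : Int :=
  match row with
  | [] => 0
  | p :: t => (PySem.List.pyGet? p 0).getD 0 + pvRowSum t

-- structural recursion over the rows, adding the indicator back-to-front
def calc_correct_rows_alt (sensor_state : List (List (List Int))) : Int :=
  match sensor_state with
  | [] => 0
  | r :: t => (if pvRowSum r > 15 then 1 else 0) + calc_correct_rows_alt t

-- ===== PRECONDITION & SPEC =====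
-- Pre_ excludes inputs with an empty pixel, where Python A (and B) raise IndexError on pixel[0].
def Pre_calc_correct_rows (sensor_state : List (List (List Int))) : Prop :=
  ∀ rows ∈ sensor_state, ∀ pixel ∈ rows, pixel ≠ []
instance (sensor_state : List (List (List Int))) : Decidable (Pre_calc_correct_rows sensor_state) := by unfold Pre_calc_correct_rows; infer_instance
def pvWitness_calc_correct_rows : List (List (List Int)) := [[[10, 1], [9, 2]], [[1, 0]]]

def Spec_calc_correct_rows (sensor_state : List (List (List Int))) (out : Int) : Prop := out = calc_correct_rows_alt sensor_state
instance (sensor_state : List (List (List Int))) (out : Int) : Decidable (Spec_calc_correct_rows sensor_state out) := by unfold Spec_calc_correct_rows; infer_instance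

-- ===== CLAIM =====
def Claim_equal_calc_correct_rows : Prop := ∀ (sensor_state : List (List (List Int))), Dom_calc_correct_rows sensor_state → Pre_calc_correct_rows sensor_state → Spec_calc_correct_rows sensor_state (calc_correct_rows sensor_state)

-- ===== LEMMAS AND PROOFS =====
-- Phase 1 of A builds exactly the map of row sums.
theorem pv_phase1_eq_map (f : List (List Int) → Int) (s : List (List (List Int))) (acc : List Int) :
    s.foldl (fun a r => a ++ [f r]) acc = acc ++ s.map f := by
  induction s generalizing acc with
  | nil => simp
  | cons r t ih => simp [List.foldl, ih]

-- A's inner fold computes B's recursive row sum.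
theorem pv_fold_rowSum (r : List (List Int)) (c : Int) :
    r.foldl (fun s p => s + (PySem.List.pyGet? p 0).getD 0) c = c + pvRowSum r := by
  induction r generalizing c with
  | nil => simp [pvRowSum]
  | cons p t ih => simp [List.foldl, pvRowSum, ih]; ring

-- A's counting fold over the row sums equals B's back-to-front recursion.
theorem pv_count_fold (s : List (List (List Int))) (c : Int) :
    (s.map pvRowSum).foldl (fun acc row => if row > 15 then acc + 1 else acc) c
      = c + calc_correct_rows_alt s := by
  induction s generalizing c with
  | nil => simp [calc_correct_rows_alt]
  | cons r t ih =>
    simp only [List.map, List.foldl, calc_correct_rows_alt, ih]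
    split_ifs <;> ring

-- ===== VERDICT =====
theorem calc_correct_rows_spec : Claim_equal_calc_correct_rows := by
  intro s _ _
  unfold Spec_calc_correct_rows calc_correct_rows
  rw [pv_phase1_eq_map, List.nil_append]
  have h : List.foldl (fun row_evaluation pixel =>
      row_evaluation + (PySem.List.pyGet? pixel 0).getD 0) (0 : Int) = pvRowSum := by
    funext r; rw [pv_fold_rowSum]; ring
  rw [h, pv_count_fold]; ring
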